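-- pv_equiv track=rewrite | github.com/mathball31/research | approx_mult/gen_rem.py | generate_all_minterms
-- ===== SOURCE A (Python) =====
-- from itertools import chain, combinations
--
-- def invert_term(term):
--     return "(1-" + term + ")"
--
-- def concat(left, right):
--     if left == "":
--         return right
--     return left + " * " + right
--
-- def powerset(input_list):
--     return list(chain.from_iterable(combinations(input_list,r) for r in range(1, len(input_list) + 1)))
--
-- def generate_all_minterms(inputs):
--     pow_set = powerset(inputs)
--
--     minterms = []
--     for terms in pow_set:
--         num_terms = len(terms)
--         for count in range(2**num_terms):
--             minterm = ""
--             for idx, term in enumerate(terms):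
--                 if count & (1 << idx) == 0:
--                     minterm = concat(minterm, term)
--                 else:
--                     minterm = concat(minterm, invert_term(term))
--             minterms.append(minterm)
--     return minterms
-- ===== SOURCE B (Python) =====
-- from itertools import chain, combinations
--
-- def invert_term(term):
--     return "(1-" + term + ")"
--
-- def concat(left, right):
--     if left == "":
--         return right
--     return left + " * " + right
--
-- def powerset(input_list):
--     return list(chain.from_iterable(combinations(input_list, r) for r in range(1, len(input_list) + 1)))
--
-- def generate_all_minterms(inputs):
--     minterms = []
--     for terms in powerset(inputs):
--         partial = [""]
--         for term in terms:
--             partial = [concat(m, term) for m in partial] + \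
--                       [concat(m, invert_term(term)) for m in partial]
--         minterms.extend(partial)
--     return minterms
-- ===== Notes on version B (the rewrite author's own statement) =====
-- stated objective: alternative
-- what changed: The inner 'for count in range(2**k)' bitmask loop that rebuilds each minterm by testing counter bits is replaced by an incremental doubling construction that extends a list of partial minterms once per term (normal branch first, then inverted), producing the same strings in the same order.
import Mathlib
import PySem

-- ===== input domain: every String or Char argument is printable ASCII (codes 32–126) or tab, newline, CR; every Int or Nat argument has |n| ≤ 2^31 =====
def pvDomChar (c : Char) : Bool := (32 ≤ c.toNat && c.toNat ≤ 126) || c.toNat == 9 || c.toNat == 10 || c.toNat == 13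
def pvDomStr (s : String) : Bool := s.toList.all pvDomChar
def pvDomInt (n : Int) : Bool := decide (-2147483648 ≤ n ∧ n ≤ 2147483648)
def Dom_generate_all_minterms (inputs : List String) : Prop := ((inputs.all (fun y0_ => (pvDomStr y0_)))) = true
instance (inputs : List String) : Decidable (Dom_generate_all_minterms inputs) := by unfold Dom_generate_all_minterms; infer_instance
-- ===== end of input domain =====

-- B replaces A's counter/bit-test enumeration of each subset's 2^k sign patterns by an
-- incremental doubling of parts minterms (objective: alternative decomposition, same order).

-- ===== PORT A =====
-- shared helpers of both Python versions (invert_term, concat, powerset)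
def invertP (term : String) : String := "(1-" ++ term ++ ")"

def concatP (left right : String) : String :=
  if left = "" then right else left ++ " * " ++ right

-- port of itertools.combinations(input_list, r) in its exact emission order
def combosP : Nat → List String → List (List String)
  | 0, _ => [[]]
  | _ + 1, [] => []
  | r + 1, x :: xs => (combosP r xs).map (x :: ·) ++ combosP (r + 1) xs

-- powerset: chain.from_iterable(combinations(l, r) for r in range(1, len(l)+1))
def powersetP (l : List String) : List (List String) :=
  (List.range l.length).flatMap (fun r => combosP (r + 1) l)

-- enumerate(terms) (indices are the nonnegative Nats 0,1,… exactly as in Python)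
def enumerateN (s : Nat) : List String → List (Nat × String)
  | [] => []
  | x :: xs => (s, x) :: enumerateN (s + 1) xs

def generate_all_minterms (inputs : List String) : List String :=
  let pow_set := powersetP inputs
  pow_set.foldl (fun minterms terms =>
    let num_terms := terms.length
    (List.range (2 ^ num_terms)).foldl (fun ms count =>
      ms ++ [(enumerateN 0 terms).foldl (fun minterm it =>
        if count &&& (1 <<< it.1) = 0 then concatP minterm it.2
        else concatP minterm (invertP it.2)) ""]) minterms) []

-- ===== PORT B =====
def generate_all_minterms_alt (inputs : List String) : List String :=
  (powersetP inputs).foldl (fun minterms terms =>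
    minterms ++ terms.foldl (fun parts term =>
      parts.map (fun m => concatP m term) ++
      parts.map (fun m => concatP m (invertP term))) [""]) []

-- ===== PRECONDITION & SPEC =====
def Spec_generate_all_minterms (inputs : List String) (out : List String) : Prop := out = generate_all_minterms_alt inputs
instance (inputs : List String) (out : List String) : Decidable (Spec_generate_all_minterms inputs out) := by unfold Spec_generate_all_minterms; infer_instance

-- ===== CLAIM (what is proved, stated in full; the proofs are below) =====
def Claim_equal_generate_all_minterms : Prop := ∀ (inputs : List String), Dom_generate_all_minterms inputs → Spec_generate_all_minterms inputs (generate_all_minterms inputs)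

-- ===== LEMMAS AND PROOFS =====

-- A's inner minterm for a fixed subset and counter value
def mkA (terms : List String) (count : Nat) : String :=
  (enumerateN 0 terms).foldl (fun minterm it =>
    if count &&& (1 <<< it.1) = 0 then concatP minterm it.2
    else concatP minterm (invertP it.2)) ""

-- B's doubling construction for a fixed subset
def dblB (terms : List String) : List String :=
  terms.foldl (fun parts term =>
    parts.map (fun m => concatP m term) ++
    parts.map (fun m => concatP m (invertP term))) [""]

theorem enumerateN_append (s : Nat) (l : List String) (t : String) :
    enumerateN s (l ++ [t]) = enumerateN s l ++ [(s + l.length, t)] := by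
  induction l generalizing s with
  | nil => simp [enumerateN]
  | cons x xs ih => simp [enumerateN, ih, Nat.add_assoc, Nat.add_comm 1]

theorem enumerateN_mem_lt (s : Nat) (l : List String) (it : Nat × String)
    (h : it ∈ enumerateN s l) : it.1 < s + l.length := by
  induction l generalizing s with
  | nil => simp [enumerateN] at h
  | cons x xs ih =>
    simp only [enumerateN, List.mem_cons] at h
    rcases h with h | h
    · subst h; simp only [List.length_cons]; omega
    · have := ih (s + 1) h; simp only [List.length_cons]; omega

theorem bit_eq_low (k c idx : Nat) (h : idx < k) :
    (2 ^ k + c) &&& (1 <<< idx) = c &&& (1 <<< idx) := by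
  rw [Nat.one_shiftLeft, Nat.and_two_pow, Nat.and_two_pow,
    Nat.testBit_two_pow_add_gt h]

theorem foldl_mk_congr (c d : Nat) (l : List (Nat × String))
    (hb : ∀ it ∈ l, c &&& (1 <<< it.1) = d &&& (1 <<< it.1)) (m : String) :
    l.foldl (fun minterm it =>
      if c &&& (1 <<< it.1) = 0 then concatP minterm it.2
      else concatP minterm (invertP it.2)) m
    = l.foldl (fun minterm it =>
      if d &&& (1 <<< it.1) = 0 then concatP minterm it.2
      else concatP minterm (invertP it.2)) m := by
  induction l generalizing m with
  | nil => rfl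
  | cons p ps ih =>
    simp only [List.foldl_cons]
    rw [hb p (List.mem_cons_self ..)]
    exact ih (fun it hit => hb it (List.mem_cons_of_mem _ hit)) _

-- the key equality: A's bitmask-ordered list of minterms = B's doubling list
theorem range_mk_eq_dbl (terms : List String) :
    (List.range (2 ^ terms.length)).map (mkA terms) = dblB terms := by
  induction terms using List.reverseRecOn with
  | nil => simp [mkA, dblB, enumerateN]
  | append_singleton p t ih =>
    have hk : (p ++ [t]).length = p.length + 1 := by simp
    set k := p.length with hkdef
    have hlo : ∀ c, c < 2 ^ k → mkA (p ++ [t]) c = concatP (mkA p c) t := by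
      intro c hc
      unfold mkA
      rw [enumerateN_append, List.foldl_append]
      simp only [List.foldl_cons, List.foldl_nil, Nat.zero_add]
      rw [if_pos (by
        rw [Nat.one_shiftLeft, Nat.and_two_pow, Nat.testBit_lt_two_pow hc]; simp)]
    have hhi : ∀ c, c < 2 ^ k →
        mkA (p ++ [t]) (2 ^ k + c) = concatP (mkA p c) (invertP t) := by
      intro c hc
      unfold mkA
      rw [enumerateN_append, List.foldl_append]
      simp only [List.foldl_cons, List.foldl_nil, Nat.zero_add]
      rw [foldl_mk_congr (2 ^ k + c) c _
        (fun it hit => bit_eq_low k c it.1 (by simpa using enumerateN_mem_lt 0 p it hit))]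
      rw [if_neg (by
        rw [Nat.one_shiftLeft, Nat.and_two_pow, Nat.testBit_two_pow_add_eq,
          Nat.testBit_lt_two_pow hc]
        simp)]
    have hdbl : dblB (p ++ [t]) =
        (dblB p).map (fun m => concatP m t) ++ (dblB p).map (fun m => concatP m (invertP t)) := by
      unfold dblB
      rw [List.foldl_append]
      simp
    rw [hdbl, ← ih, hk, pow_succ, Nat.mul_two, List.range_add, List.map_append]
    simp only [List.map_map, Function.comp_def]
    congr 1
    · exact List.map_congr_left (fun c hc => hlo c (List.mem_range.mp hc))
    · exact List.map_congr_left (fun c hc => hhi c (List.mem_range.mp hc))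

theorem foldl_snoc_map (l : List Nat) (f : Nat → String) (acc : List String) :
    l.foldl (fun a c => a ++ [f c]) acc = acc ++ l.map f := by
  induction l generalizing acc with
  | nil => simp
  | cons x xs ih => simp [ih]

-- ===== VERDICT (by name: the statement is the Claim_ definition above) =====
theorem generate_all_minterms_spec : Claim_equal_generate_all_minterms := by
  intro inputs _
  show generate_all_minterms inputs = generate_all_minterms_alt inputs
  unfold generate_all_minterms generate_all_minterms_alt
  have hf : (fun (minterms : List String) (terms : List String) =>
      (List.range (2 ^ terms.length)).foldl (fun ms count =>
        ms ++ [(enumerateN 0 terms).foldl (fun minterm it =>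
          if count &&& (1 <<< it.1) = 0 then concatP minterm it.2
          else concatP minterm (invertP it.2)) ""]) minterms)
      = (fun (minterms : List String) (terms : List String) =>
      minterms ++ terms.foldl (fun parts term =>
        parts.map (fun m => concatP m term) ++
        parts.map (fun m => concatP m (invertP term))) [""]) := by
    funext minterms terms
    rw [foldl_snoc_map]
    exact congrArg _ (range_mk_eq_dbl terms)
  simp only [hf]
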